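-- pv_equiv track=rewrite | github.com/hrydbeck/smittvarnings_app | fast_profiles/rebuild_profiles.py | build_mappings
-- ===== SOURCE A (Python) =====
-- from typing import List
--
-- def build_mappings(rows: List[List[str]]) -> List[dict]:
--     L = max(len(r) for r in rows) if rows else 0
--     mappings = [dict() for _ in range(L)]
--     for r in rows:
--         for i, allele in enumerate(r):
--             if allele == '' or allele == '0':
--                 continue
--             mp = mappings[i]
--             if allele not in mp:
--                 mp[allele] = len(mp) + 1
--     return mappings
-- ===== SOURCE B (Python) =====
-- from itertools import zip_longest
-- from typing import List
--
-- def build_mappings(rows: List[List[str]]) -> List[dict]: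
--     result = []
--     for col in zip_longest(*rows, fillvalue=''):
--         mp = {}
--         for allele in col:
--             if allele == '' or allele == '0':
--                 continue
--             if allele not in mp:
--                 mp[allele] = len(mp) + 1
--         result.append(mp)
--     return result
-- ===== Notes on version B (the rewrite author's own statement) =====
-- stated objective: alternative
-- what changed: B transposes the rows column-major with itertools.zip_longest (fillvalue '') and builds each column's allele->index dict independently, instead of A's row-major scan that updates all column dicts simultaneously.
import Mathlib
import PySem

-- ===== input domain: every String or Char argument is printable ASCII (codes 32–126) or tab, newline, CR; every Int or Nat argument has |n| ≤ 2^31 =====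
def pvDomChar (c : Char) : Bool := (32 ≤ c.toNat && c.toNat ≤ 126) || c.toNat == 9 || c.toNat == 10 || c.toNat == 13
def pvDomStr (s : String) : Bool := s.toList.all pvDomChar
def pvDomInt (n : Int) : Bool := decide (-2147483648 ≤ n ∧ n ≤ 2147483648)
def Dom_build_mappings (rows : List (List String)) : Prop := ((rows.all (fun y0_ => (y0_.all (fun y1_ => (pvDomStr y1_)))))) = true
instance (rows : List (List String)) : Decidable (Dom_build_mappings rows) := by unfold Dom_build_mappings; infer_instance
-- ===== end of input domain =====

-- B re-implements A by transposing the rows column-major (zip_longest with fillvalue '') and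
-- building each column's dict independently, instead of A's row-major simultaneous update; alternative decomposition, same cost.

-- ===== PORT A =====
-- inner loop `for i, allele in enumerate(r)` of A (i is the running enumerate index)
def bmRowLoop (ms : List (PySem.Dict String Int)) (i : Nat) (r : List String) : List (PySem.Dict String Int) :=
  match r with
  | [] => ms
  | allele :: rest =>
    if allele = "" ∨ allele = "0" then bmRowLoop ms (i + 1) rest
    else
      -- mappings[i]: always in range in A (i < len r ≤ L); getD makes the port total
      let mp := ms.getD i PySem.Dict.empty
      if mp.contains allele then bmRowLoop ms (i + 1) rest
      else bmRowLoop (ms.set i (mp.insert allele ((mp.size : Int) + 1))) (i + 1) rest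

def build_mappings (rows : List (List String)) : List (List (String × Int)) :=
  let L := if rows.isEmpty then 0 else (PySem.List.max? (rows.map (fun r => r.length)) (fun x => x)).getD 0
  let mappings := (List.range L).map (fun _ => (PySem.Dict.empty : PySem.Dict String Int))
  (rows.foldl (fun ms r => bmRowLoop ms 0 r) mappings).map (fun d => d.items)

-- ===== PORT B =====
-- B's inner-loop body on a single column's dict
def bmStep (d : PySem.Dict String Int) (allele : String) : PySem.Dict String Int :=
  if allele = "" ∨ allele = "0" then d
  else if d.contains allele then d
  else d.insert allele ((d.size : Int) + 1)

def build_mappings_alt (rows : List (List String)) : List (List (String × Int)) :=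
  -- zip_longest(*rows, fillvalue=''): L columns, column j = j-th entry of each row padded with ''
  let L := rows.foldl (fun m r => max m r.length) 0
  let cols := (List.range L).map (fun j => rows.map (fun r => r.getD j ""))
  cols.map (fun col => (col.foldl bmStep PySem.Dict.empty).items)

-- ===== PRECONDITION & SPEC =====
def Spec_build_mappings (rows : List (List String)) (out : List (List (String × Int))) : Prop := out = build_mappings_alt rows
instance (rows : List (List String)) (out : List (List (String × Int))) : Decidable (Spec_build_mappings rows out) := by unfold Spec_build_mappings; infer_instance

-- ===== CLAIM (what is proved, stated in full; the proofs are below) =====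
def Claim_equal_build_mappings : Prop := ∀ (rows : List (List String)), Dom_build_mappings rows → Spec_build_mappings rows (build_mappings rows)

-- ===== LEMMAS AND PROOFS =====

theorem bmStep_pad (d : PySem.Dict String Int) : bmStep d "" = d := by
  simp [bmStep]

theorem bmRowLoop_cons (ms : List (PySem.Dict String Int)) (i : Nat) (a : String) (rest : List String) :
    bmRowLoop ms i (a :: rest) =
      if a = "" ∨ a = "0" then bmRowLoop ms (i + 1) rest
      else if (ms.getD i PySem.Dict.empty).contains a then bmRowLoop ms (i + 1) rest
      else bmRowLoop
        (ms.set i ((ms.getD i PySem.Dict.empty).insert a (((ms.getD i PySem.Dict.empty).size : Int) + 1)))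
        (i + 1) rest := rfl

-- A's two computations of the column count agree
theorem bmL_eq (rows : List (List String)) :
    (if rows.isEmpty then 0 else (PySem.List.max? (rows.map (fun r => r.length)) (fun x => x)).getD 0)
      = rows.foldl (fun m r => max m r.length) 0 := by
  cases rows with
  | nil => simp
  | cons r rest =>
    simp only [List.isEmpty_cons, List.map, if_neg Bool.false_ne_true,
      PySem.List.max?_id_cons, Option.getD_some, List.foldl_cons, List.foldl_map,
      Nat.zero_max]

-- effect of A's inner loop on each column of the state
theorem bmRowLoop_get? (r : List String) (ms : List (PySem.Dict String Int)) (i j : Nat) :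
    (bmRowLoop ms i r)[j]? =
      if j < i then ms[j]? else (ms[j]?).map (fun d => bmStep d (r.getD (j - i) "")) := by
  induction r generalizing ms i with
  | nil =>
    simp only [bmRowLoop]
    split
    · rfl
    · cases h : ms[j]? <;> simp [List.getD, bmStep_pad]
  | cons a rest ih =>
    rw [bmRowLoop_cons]
    by_cases hskip : a = "" ∨ a = "0"
    · rw [if_pos hskip, ih]
      rcases lt_trichotomy j i with h | h | h
      · simp [h, Nat.lt_succ_of_lt h]
      · subst h
        simp only [Nat.lt_succ_self, if_pos, if_neg (lt_irrefl j), Nat.sub_self]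
        cases hm : ms[j]? <;> simp [List.getD, bmStep, hskip]
      · have h1 : ¬ j < i + 1 := by omega
        have h2 : ¬ j < i := by omega
        have h3 : j - i = (j - (i+1)) + 1 := by omega
        simp [h1, h2, h3, List.getD]
    · rw [if_neg hskip]
      by_cases hc : (ms.getD i PySem.Dict.empty).contains a
      · rw [if_pos hc, ih]
        rcases lt_trichotomy j i with h | h | h
        · simp [h, Nat.lt_succ_of_lt h]
        · subst h
          simp only [Nat.lt_succ_self, if_pos, if_neg (lt_irrefl j), Nat.sub_self]
          cases hm : ms[j]? with
          | none => rfl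
          | some d =>
            have hd : ms.getD j PySem.Dict.empty = d := by
              rw [List.getD_eq_getElem?_getD, hm]; rfl
            rw [hd] at hc
            simp [List.getD, bmStep, hskip, hc]
        · have h1 : ¬ j < i + 1 := by omega
          have h2 : ¬ j < i := by omega
          have h3 : j - i = (j - (i+1)) + 1 := by omega
          simp [h1, h2, h3, List.getD]
      · rw [if_neg hc, ih]
        set mp := ms.getD i PySem.Dict.empty with hmp
        rcases lt_trichotomy j i with h | h | h
        · simp [h, Nat.lt_succ_of_lt h, List.getElem?_set_ne (by omega : i ≠ j)]
        · subst h
          simp only [Nat.lt_succ_self, if_pos, if_neg (lt_irrefl j), Nat.sub_self]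
          by_cases hj : j < ms.length
          · have hset : (ms.set j (mp.insert a ((mp.size : Int) + 1)))[j]?
                = some (mp.insert a ((mp.size : Int) + 1)) := by
              rw [List.getElem?_set_self (by simpa using hj)]
            rw [hset]
            have hm : ms[j]? = some ms[j] := List.getElem?_eq_getElem hj
            have hd : mp = ms[j] := by
              rw [hmp, List.getD_eq_getElem?_getD, hm]; rfl
            rw [hm]
            rw [hd] at hc ⊢
            simp [List.getD, bmStep, hskip, hc]
          · have hnone : ms[j]? = none := List.getElem?_eq_none (le_of_not_gt hj)
            rw [List.set_eq_of_length_le (le_of_not_gt hj), hnone]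
            rfl
        · have h1 : ¬ j < i + 1 := by omega
          have h2 : ¬ j < i := by omega
          have h3 : j - i = (j - (i+1)) + 1 := by omega
          simp [h1, h2, h3, List.getD, List.getElem?_set_ne (by omega : i ≠ j)]

-- effect of A's outer loop over all rows, column by column
theorem bmFold_get? (rows : List (List String)) (ms : List (PySem.Dict String Int)) (j : Nat) :
    (rows.foldl (fun ms r => bmRowLoop ms 0 r) ms)[j]? =
      (ms[j]?).map (fun d => rows.foldl (fun d r => bmStep d (r.getD j "")) d) := by
  induction rows generalizing ms with
  | nil => cases h : ms[j]? <;> simp [h]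
  | cons r rest ih =>
    simp only [List.foldl_cons]
    rw [ih, bmRowLoop_get?]
    simp only [Nat.not_lt_zero, if_false, Nat.sub_zero]
    cases h : ms[j]? <;> simp

-- A's state keeps its length through the loops
theorem bmRowLoop_length (r : List String) (ms : List (PySem.Dict String Int)) (i : Nat) :
    (bmRowLoop ms i r).length = ms.length := by
  induction r generalizing ms i with
  | nil => rfl
  | cons a rest ih =>
    simp only [bmRowLoop]
    split
    · exact ih ms (i+1)
    · split
      · exact ih ms (i+1)
      · rw [ih]; simp

theorem bmFold_length (rows : List (List String)) (ms : List (PySem.Dict String Int)) :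
    (rows.foldl (fun ms r => bmRowLoop ms 0 r) ms).length = ms.length := by
  induction rows generalizing ms with
  | nil => rfl
  | cons r rest ih => rw [List.foldl_cons, ih, bmRowLoop_length]

-- ===== VERDICT (by name: the statement is the Claim_ definition above) =====
theorem build_mappings_spec : Claim_equal_build_mappings := by
  intro rows _
  unfold Spec_build_mappings build_mappings build_mappings_alt
  rw [bmL_eq]
  set L := rows.foldl (fun m r => max m r.length) 0 with hL
  apply List.ext_getElem?
  intro j
  by_cases hj : j < L
  · rw [List.getElem?_map, List.getElem?_map, bmFold_get?]
    have hinit : ((List.range L).map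
        (fun _ => (PySem.Dict.empty : PySem.Dict String Int)))[j]? = some PySem.Dict.empty := by
      simp [hj]
    have hcol : ((List.range L).map (fun j => rows.map (fun r => r.getD j "")))[j]?
        = some (rows.map (fun r => r.getD j "")) := by
      simp [hj]
    rw [hinit, hcol]
    simp [List.foldl_map]
  · have h1 : ((rows.foldl (fun ms r => bmRowLoop ms 0 r)
        ((List.range L).map (fun _ => (PySem.Dict.empty : PySem.Dict String Int)))).map
          (fun d => d.items))[j]? = none := by
      apply List.getElem?_eq_none
      rw [List.length_map, bmFold_length, List.length_map, List.length_range]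
      omega
    have h2 : (((List.range L).map (fun j => rows.map (fun r => r.getD j ""))).map
        (fun col => (col.foldl bmStep PySem.Dict.empty).items))[j]? = none := by
      apply List.getElem?_eq_none
      rw [List.length_map, List.length_map, List.length_range]
      omega
    rw [h1, h2]
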